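-- pv_equiv track=rewrite | github.com/2mingyu/python-practice | 2024-09-알고리즘_튜터링/8_search_algorithms.py | dfs_maze
-- ===== SOURCE A (Python) =====
-- def dfs_maze(maze, start, end):
--     stack = [start]
--     visited = set()
--     path = []
--
--     while stack:
--         current = stack.pop()
--         if current == end:
--             path.append(current)
--             break
--         if current not in visited:
--             visited.add(current)
--             path.append(current)
--             neighbors = maze[current]
--             for neighbor in neighbors:
--                 if neighbor not in visited:
--                     stack.append(neighbor)
--
--     return path
-- ===== SOURCE B (Python) =====
-- def dfs_maze(maze, start, end):
--     # Recursive DFS instead of an explicit node stack: visit(node) marks/appends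
--     # the node and recurses into its neighbors in reverse order (matching the
--     # LIFO order of a stack); it returns True the moment `end` is reached, which
--     # unwinds the whole recursion. `end` is appended without being marked visited.
--     visited = set()
--     path = []
--
--     def visit(node):
--         if node == end:
--             path.append(node)
--             return True
--         if node in visited:
--             return False
--         visited.add(node)
--         path.append(node)
--         for neighbor in reversed(maze[node]):
--             if visit(neighbor):
--                 return True
--         return False
--
--     visit(start)
--     return path
-- ===== Notes on version B (the rewrite author's own statement) =====
-- stated objective: alternative
-- what changed: A runs an iterative DFS over an explicit LIFO node stack (neighbors pushed with a push-time visited filter, re-checked at pop time, end detected when popped); B is a recursive DFS: a visit(node) function that marks/appends the node and recurses into its neighbors in reverse order, returning True to unwind the whole recursion the moment end is reached.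
-- outside the precondition, e.g. on dfs_maze({'a': ['c', 'b']}, 'a', 'b'): A returns ['a', 'b'], B returns ['a', 'b']
import Mathlib
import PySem

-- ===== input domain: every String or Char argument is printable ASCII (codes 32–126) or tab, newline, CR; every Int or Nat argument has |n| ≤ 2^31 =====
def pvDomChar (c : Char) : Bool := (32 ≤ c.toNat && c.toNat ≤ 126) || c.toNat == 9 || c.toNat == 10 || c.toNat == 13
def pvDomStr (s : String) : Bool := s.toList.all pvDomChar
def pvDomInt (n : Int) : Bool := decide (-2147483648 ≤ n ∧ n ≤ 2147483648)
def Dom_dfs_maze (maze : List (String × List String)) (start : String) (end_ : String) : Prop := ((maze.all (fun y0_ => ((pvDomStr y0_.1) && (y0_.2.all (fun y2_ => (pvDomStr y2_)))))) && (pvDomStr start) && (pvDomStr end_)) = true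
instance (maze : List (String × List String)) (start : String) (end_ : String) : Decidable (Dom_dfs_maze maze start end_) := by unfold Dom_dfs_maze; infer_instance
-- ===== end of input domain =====

-- B replaces A's explicit LIFO node stack by a recursive DFS (visit(node) recursing into the
-- reversed neighbor list, unwinding as soon as `end` is found): objective 'alternative'.

-- number of dict keys not yet visited: the termination measure of A's loop
def pvKeyCount (maze : List (String × List String)) (visited : PySem.Set String) : Nat :=
  ((maze.map Prod.fst).filter (fun k => !(PySem.Set.contains visited k))).length

theorem pvFilterCount_lt (ks : List String) (visited : PySem.Set String)
    (n : String) (hk : n ∈ ks) (hv : PySem.Set.contains visited n = false) :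
    (ks.filter (fun k => !(PySem.Set.contains (PySem.Set.add visited n) k))).length <
      (ks.filter (fun k => !(PySem.Set.contains visited k))).length := by
  have hmono : ∀ (a : String), PySem.Set.contains visited a = true →
      PySem.Set.contains (PySem.Set.add visited n) a = true := by
    intro a h
    rw [PySem.Set.contains_iff] at h ⊢
    exact (PySem.Set.mem_add _ _ _).2 (Or.inl h)
  have hsub : ∀ (l : List String),
      (l.filter (fun k => !(PySem.Set.contains (PySem.Set.add visited n) k))).length ≤
        (l.filter (fun k => !(PySem.Set.contains visited k))).length := by
    intro l
    apply List.Sublist.length_le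
    apply List.monotone_filter_right
    intro a ha
    simp only [Bool.not_eq_eq_eq_not, Bool.not_true] at ha ⊢
    rw [Bool.eq_false_iff] at ha ⊢
    intro h
    exact ha (hmono a h)
  have hn : PySem.Set.contains (PySem.Set.add visited n) n = true := by
    simp [PySem.Set.contains_iff, PySem.Set.mem_add]
  induction ks with
  | nil => cases hk
  | cons x xs ih =>
    rcases List.mem_cons.1 hk with rfl | hx
    · simp only [List.filter_cons, hn, hv, Bool.not_true, Bool.not_false, if_neg, List.length_cons]
      simp only [Bool.false_eq_true, if_false, if_true]
      exact Nat.lt_succ_of_le (hsub xs)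
    · have hlt := ih hx
      by_cases h1 : PySem.Set.contains (PySem.Set.add visited n) x = true
      · by_cases h2 : PySem.Set.contains visited x = true
        · simp only [List.filter_cons, h1, h2, Bool.not_true, Bool.false_eq_true, if_false]
          omega
        · simp only [Bool.not_eq_true] at h2
          simp only [List.filter_cons, h1, h2, Bool.not_true, Bool.not_false,
            Bool.false_eq_true, if_false, if_true, List.length_cons]
          omega
      · simp only [Bool.not_eq_true] at h1
        have h2 : PySem.Set.contains visited x = false := by
          rw [Bool.eq_false_iff] at h1 ⊢
          intro h
          exact h1 (hmono x h)
        simp only [List.filter_cons, h1, h2, Bool.not_false, if_true, List.length_cons]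
        omega

theorem pvKeyCount_lt (maze : List (String × List String)) (visited : PySem.Set String)
    (n : String) (hk : n ∈ maze.map Prod.fst) (hv : PySem.Set.contains visited n = false) :
    pvKeyCount maze (PySem.Set.add visited n) < pvKeyCount maze visited :=
  pvFilterCount_lt _ _ _ hk hv

theorem pvGet?_mk_mem (maze : List (String × List String)) (k : String) (v : List String)
    (h : (PySem.Dict.mk maze).get? k = some v) : k ∈ maze.map Prod.fst := by
  induction maze with
  | nil => simp [PySem.Dict.get?] at h
  | cons p rest ih =>
    obtain ⟨k1, v1⟩ := p
    rw [PySem.Dict.get?_mk_cons] at h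
    by_cases hb : (k1 == k) = true
    · simp [eq_of_beq hb]
    · rw [if_neg hb] at h
      exact List.mem_cons_of_mem _ (ih h)

-- ===== PORT A =====
-- the while loop; the Python stack's top (list end, `pop()`) is handled by PySem.List.pop?
def pvLoopA (maze : List (String × List String)) (end_ : String)
    (stack : List String) (visited : PySem.Set String) (path : List String) : List String :=
  match hpop : PySem.List.pop? stack with
  | none => path
  | some (current, stack') =>
    if current == end_ then path ++ [current]
    else if PySem.Set.contains visited current then pvLoopA maze end_ stack' visited path
    else
      let visited' := PySem.Set.add visited current
      let path' := path ++ [current]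
      match hget : (PySem.Dict.mk maze).get? current with
      | none => path'   -- Python raises KeyError here (outside Pre_)
      | some neighbors =>
        pvLoopA maze end_
          (neighbors.foldl (fun st n => if PySem.Set.contains visited' n then st else st ++ [n]) stack')
          visited' path'
termination_by (pvKeyCount maze visited, stack.length)
decreasing_by
  · apply Prod.Lex.right
    have := PySem.List.length_of_pop?_eq_some _ hpop
    simp at this; omega
  · apply Prod.Lex.left
    apply pvKeyCount_lt
    · exact pvGet?_mk_mem maze current neighbors hget
    · simp_all

def dfs_maze (maze : List (String × List String)) (start : String) (end_ : String) : List String :=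
  pvLoopA maze end_ [start] PySem.Set.empty []

-- ===== PORT B =====
-- visit(node): result is the updated (visited, path) plus the Python return value
-- (True = end found / recursion aborts). pvVisitAll is the `for neighbor in reversed(...)`
-- loop over the remaining neighbors. `fuel` only makes the mutual recursion total
-- (each descent into pvVisitAll consumes one unit; maze.length + 1 never runs out,
-- proved in pvFuel_enough below); it does not alter the computation.
mutual
def pvVisit (maze : List (String × List String)) (end_ : String) (fuel : Nat)
    (node : String) (visited : PySem.Set String) (path : List String) :
    PySem.Set String × List String × Bool :=
  match fuel with
  | 0 => (visited, path, true)   -- never reached, see pvFuel_enough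
  | fuel + 1 =>
    if node == end_ then (visited, path ++ [node], true)
    else if PySem.Set.contains visited node then (visited, path, false)
    else
      match (PySem.Dict.mk maze).get? node with
      | none => (PySem.Set.add visited node, path ++ [node], true)   -- Python raises KeyError (outside Pre_)
      | some ns =>
        pvVisitAll maze end_ fuel ns.reverse (PySem.Set.add visited node) (path ++ [node])
termination_by (fuel, 0)

def pvVisitAll (maze : List (String × List String)) (end_ : String) (fuel : Nat)
    (work : List String) (visited : PySem.Set String) (path : List String) :
    PySem.Set String × List String × Bool :=
  match work with
  | [] => (visited, path, false)
  | neighbor :: rest =>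
    match pvVisit maze end_ fuel neighbor visited path with
    | (v', p', true) => (v', p', true)
    | (v', p', false) => pvVisitAll maze end_ fuel rest v' p'
termination_by (fuel, work.length + 1)
end

def dfs_maze_alt (maze : List (String × List String)) (start : String) (end_ : String) : List String :=
  (pvVisit maze end_ (maze.length + 1) start PySem.Set.empty []).2.1

-- ===== PRECONDITION & SPEC =====
-- Pre_ excludes inputs with a dangling reference: a start or listed neighbor that is neither a
-- dict key nor `end`. When such a node is reached, Python A raises KeyError; the condition is
-- closed-form and so conservatively also excludes inputs whose dangling node is never reached,
-- on which A returns normally (see cites).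
def Pre_dfs_maze (maze : List (String × List String)) (start : String) (end_ : String) : Prop :=
  start = end_ ∨ (start ∈ maze.map Prod.fst ∧
    ∀ p ∈ maze, ∀ n ∈ p.2, n ∈ maze.map Prod.fst ∨ n = end_)
instance (maze : List (String × List String)) (start : String) (end_ : String) : Decidable (Pre_dfs_maze maze start end_) := by unfold Pre_dfs_maze; infer_instance

def pvWitness_dfs_maze : (List (String × List String)) × String × String :=
  ([("a", ["b", "c"]), ("b", ["a"]), ("c", [])], "a", "c")

def Spec_dfs_maze (maze : List (String × List String)) (start : String) (end_ : String) (out : List String) : Prop := out = dfs_maze_alt maze start end_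
instance (maze : List (String × List String)) (start : String) (end_ : String) (out : List String) : Decidable (Spec_dfs_maze maze start end_ out) := by unfold Spec_dfs_maze; infer_instance

-- ===== CLAIM (what is proved, stated in full; the proofs are below) =====
def Claim_equal_dfs_maze : Prop := ∀ (maze : List (String × List String)) (start : String) (end_ : String), Dom_dfs_maze maze start end_ → Pre_dfs_maze maze start end_ → Spec_dfs_maze maze start end_ (dfs_maze maze start end_)

-- ===== LEMMAS AND PROOFS =====

-- the common sequential skeleton both programs are proved equal to: one flat worklist,
-- processed front-first, revisit checks at processing time only
def pvGo (maze : List (String × List String)) (end_ : String)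
    (work : List String) (visited : PySem.Set String) (path : List String) : List String :=
  match work with
  | [] => path
  | node :: t =>
    if node == end_ then path ++ [node]
    else if PySem.Set.contains visited node then pvGo maze end_ t visited path
    else
      let visited' := PySem.Set.add visited node
      let path' := path ++ [node]
      match hget : (PySem.Dict.mk maze).get? node with
      | none => path'
      | some ns => pvGo maze end_ (ns.reverse ++ t) visited' path'
termination_by (pvKeyCount maze visited, work.length)
decreasing_by
  · apply Prod.Lex.right; simp
  · apply Prod.Lex.left
    apply pvKeyCount_lt
    · exact pvGet?_mk_mem maze node ns hget
    · simp_all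


inductive pvDel (v : PySem.Set String) : List String → List String → Prop
  | nil : pvDel v [] []
  | keep {n : String} {a l : List String} : pvDel v a l → pvDel v (n :: a) (n :: l)
  | drop {n : String} {a l : List String} :
      PySem.Set.contains v n = true → pvDel v a l → pvDel v a (n :: l)

theorem pvDel_mono {v w : PySem.Set String} {a l : List String}
    (hvw : ∀ x, PySem.Set.contains v x = true → PySem.Set.contains w x = true)
    (h : pvDel v a l) : pvDel w a l := by
  induction h with
  | nil => exact pvDel.nil
  | keep _ ih => exact pvDel.keep ih
  | drop hm _ ih => exact pvDel.drop (hvw _ hm) ih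

theorem pvDel_append {v : PySem.Set String} {a1 l1 a2 l2 : List String}
    (h1 : pvDel v a1 l1) (h2 : pvDel v a2 l2) : pvDel v (a1 ++ a2) (l1 ++ l2) := by
  induction h1 with
  | nil => exact h2
  | keep _ ih => exact pvDel.keep ih
  | drop hm _ ih => exact pvDel.drop hm ih

theorem pvDel_filter (v : PySem.Set String) (l : List String) :
    pvDel v (l.filter (fun n => !(PySem.Set.contains v n))) l := by
  induction l with
  | nil => exact pvDel.nil
  | cons x xs ih =>
    by_cases hx : PySem.Set.contains v x = true
    · rw [show (x :: xs).filter (fun n => !(PySem.Set.contains v n))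
          = xs.filter (fun n => !(PySem.Set.contains v n)) from by
        simp [List.filter_cons]
        exact (PySem.Set.contains_iff _ _).1 hx]
      exact pvDel.drop hx ih
    · simp only [Bool.not_eq_true] at hx
      rw [show (x :: xs).filter (fun n => !(PySem.Set.contains v n))
          = x :: xs.filter (fun n => !(PySem.Set.contains v n)) from by
        simp [List.filter_cons]
        intro hmem
        rw [(PySem.Set.contains_iff _ _).2 hmem] at hx
        cases hx]
      exact pvDel.keep ih

theorem pvFoldl_push (v' : PySem.Set String) (ns acc : List String) :
    ns.foldl (fun st m => if PySem.Set.contains v' m then st else st ++ [m]) acc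
      = acc ++ ns.filter (fun m => !(PySem.Set.contains v' m)) := by
  induction ns generalizing acc with
  | nil => simp
  | cons x xs ih =>
    rw [List.foldl_cons, List.filter_cons]
    by_cases hc : PySem.Set.contains v' x = true
    · rw [if_pos hc, show (!PySem.Set.contains v' x) = false by rw [hc]; rfl,
        if_neg (by simp)]
      exact ih acc
    · rw [Bool.not_eq_true] at hc
      rw [if_neg (by rw [hc]; exact Bool.false_ne_true), show (!PySem.Set.contains v' x) = true by rw [hc]; rfl,
        if_pos rfl, ih, List.append_assoc, List.singleton_append]

theorem pvContains_add_mono (v : PySem.Set String) (n : String) :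
    ∀ x, PySem.Set.contains v x = true → PySem.Set.contains (PySem.Set.add v n) x = true := by
  intro x h
  rw [PySem.Set.contains_iff] at h ⊢
  exact (PySem.Set.mem_add _ _ _).2 (Or.inl h)

-- step (branch) equations of pvGo / pvLoopA, extracted from their dependent matches
theorem pvGo_nil (maze : List (String × List String)) (end_ : String) (v : PySem.Set String)
    (p : List String) : pvGo maze end_ [] v p = p := by rw [pvGo]

theorem pvGo_end (maze : List (String × List String)) (end_ : String) (n : String)
    (t : List String) (v : PySem.Set String) (p : List String) (h : (n == end_) = true) :
    pvGo maze end_ (n :: t) v p = p ++ [n] := by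
  rw [pvGo]; simp [h]

theorem pvGo_skip (maze : List (String × List String)) (end_ : String) (n : String)
    (t : List String) (v : PySem.Set String) (p : List String) (h : (n == end_) = false)
    (hv : PySem.Set.contains v n = true) :
    pvGo maze end_ (n :: t) v p = pvGo maze end_ t v p := by
  rw [pvGo]; simp_all

theorem pvGo_none (maze : List (String × List String)) (end_ : String) (n : String)
    (t : List String) (v : PySem.Set String) (p : List String) (h : (n == end_) = false)
    (hv : PySem.Set.contains v n = false) (hg : (PySem.Dict.mk maze).get? n = none) :
    pvGo maze end_ (n :: t) v p = p ++ [n] := by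
  rw [pvGo]; simp_all; split <;> simp_all

theorem pvGo_expand (maze : List (String × List String)) (end_ : String) (n : String)
    (t : List String) (v : PySem.Set String) (p : List String) (ns : List String)
    (h : (n == end_) = false) (hv : PySem.Set.contains v n = false)
    (hg : (PySem.Dict.mk maze).get? n = some ns) :
    pvGo maze end_ (n :: t) v p
      = pvGo maze end_ (ns.reverse ++ t) (PySem.Set.add v n) (p ++ [n]) := by
  rw [pvGo]; simp_all; split <;> simp_all

theorem pvLoopA_nil (maze : List (String × List String)) (end_ : String)
    (stack : List String) (v : PySem.Set String) (p : List String)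
    (hpop : PySem.List.pop? stack = none) : pvLoopA maze end_ stack v p = p := by
  rw [pvLoopA]; split <;> simp_all

theorem pvLoopA_end (maze : List (String × List String)) (end_ : String)
    (stack s' : List String) (n : String) (v : PySem.Set String) (p : List String)
    (hpop : PySem.List.pop? stack = some (n, s')) (h : (n == end_) = true) :
    pvLoopA maze end_ stack v p = p ++ [n] := by
  rw [pvLoopA]; split <;> simp_all

theorem pvLoopA_skip (maze : List (String × List String)) (end_ : String)
    (stack s' : List String) (n : String) (v : PySem.Set String) (p : List String)
    (hpop : PySem.List.pop? stack = some (n, s')) (h : (n == end_) = false)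
    (hv : PySem.Set.contains v n = true) :
    pvLoopA maze end_ stack v p = pvLoopA maze end_ s' v p := by
  rw [pvLoopA]; split <;> simp_all

theorem pvLoopA_none (maze : List (String × List String)) (end_ : String)
    (stack s' : List String) (n : String) (v : PySem.Set String) (p : List String)
    (hpop : PySem.List.pop? stack = some (n, s')) (h : (n == end_) = false)
    (hv : PySem.Set.contains v n = false) (hg : (PySem.Dict.mk maze).get? n = none) :
    pvLoopA maze end_ stack v p = p ++ [n] := by
  rw [pvLoopA]; split <;> simp_all; split <;> simp_all

theorem pvLoopA_expand (maze : List (String × List String)) (end_ : String)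
    (stack s' : List String) (n : String) (v : PySem.Set String) (p : List String)
    (ns : List String)
    (hpop : PySem.List.pop? stack = some (n, s')) (h : (n == end_) = false)
    (hv : PySem.Set.contains v n = false) (hg : (PySem.Dict.mk maze).get? n = some ns) :
    pvLoopA maze end_ stack v p
      = pvLoopA maze end_
          (ns.foldl (fun st m => if PySem.Set.contains (PySem.Set.add v n) m then st else st ++ [m]) s')
          (PySem.Set.add v n) (p ++ [n]) := by
  rw [pvLoopA]; split <;> simp_all; split <;> simp_all

-- A's stack loop equals the flat worklist: A's stack, read top-first (reversed), is the
-- worklist with some already-visited entries missing (A filtered them at push time)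
theorem pvLoopA_eq_pvGo (maze : List (String × List String)) (end_ : String) :
    ∀ (K : Nat) (v : PySem.Set String), pvKeyCount maze v ≤ K →
    PySem.Set.contains v end_ = false →
    ∀ {ra l : List String} (p : List String), pvDel v ra l →
    pvLoopA maze end_ ra.reverse v p = pvGo maze end_ l v p := by
  intro K
  induction K using Nat.strong_induction_on with
  | _ K IH =>
    intro v hK hend ra l p hdel
    induction hdel with
    | nil =>
      rw [pvLoopA_nil maze end_ _ v p (by simp [PySem.List.pop?]), pvGo_nil]
    | @keep n a l hdel' iht =>
      have hpop : PySem.List.pop? ((n :: a).reverse) = some (n, a.reverse) := by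
        rw [List.reverse_cons]
        exact PySem.List.pop?_last _ _
      by_cases hne : (n == end_) = true
      · rw [pvLoopA_end maze end_ _ _ _ v p hpop hne, pvGo_end maze end_ _ _ v p hne]
      · simp only [Bool.not_eq_true] at hne
        by_cases hv : PySem.Set.contains v n = true
        · rw [pvLoopA_skip maze end_ _ _ _ v p hpop hne hv, pvGo_skip maze end_ _ _ v p hne hv]
          exact iht
        · simp only [Bool.not_eq_true] at hv
          cases hg : (PySem.Dict.mk maze).get? n with
          | none =>
            rw [pvLoopA_none maze end_ _ _ _ v p hpop hne hv hg,
              pvGo_none maze end_ _ _ v p hne hv hg]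
          | some ns =>
            rw [pvLoopA_expand maze end_ _ _ _ v p ns hpop hne hv hg,
              pvGo_expand maze end_ _ _ v p ns hne hv hg]
            rw [pvFoldl_push]
            have hmem : n ∈ maze.map Prod.fst := pvGet?_mk_mem maze n ns hg
            have hKlt : pvKeyCount maze (PySem.Set.add v n) < K :=
              Nat.lt_of_lt_of_le (pvKeyCount_lt maze v n hmem hv) hK
            have hend' : PySem.Set.contains (PySem.Set.add v n) end_ = false := by
              rw [Bool.eq_false_iff] at hend ⊢
              intro hcc
              rw [PySem.Set.contains_iff] at hcc
              rcases (PySem.Set.mem_add _ _ _).1 hcc with hcc | hcc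
              · exact hend ((PySem.Set.contains_iff _ _).2 hcc)
              · rw [hcc] at hne; simp at hne
            have hdel'' : pvDel (PySem.Set.add v n)
                ((ns.filter (fun m => !(PySem.Set.contains (PySem.Set.add v n) m))).reverse ++ a)
                (ns.reverse ++ l) := by
              apply pvDel_append
              · rw [← List.filter_reverse]
                exact pvDel_filter _ _
              · exact pvDel_mono (pvContains_add_mono v n) hdel'
            have hmain := IH _ hKlt (PySem.Set.add v n) le_rfl hend' (p ++ [n]) hdel''
            rw [List.reverse_append, List.reverse_reverse] at hmain
            exact hmain
    | @drop n a l hm hdel' iht =>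
      have hne : (n == end_) = false := by
        rw [Bool.eq_false_iff]
        intro h
        rw [Bool.eq_false_iff] at hend
        exact hend (by rw [← eq_of_beq h]; exact hm)
      rw [pvGo_skip maze end_ _ _ v p hne hm]
      exact iht

-- B's recursion equals the flat worklist: with enough fuel, visiting `node` and then
-- continuing with any worklist t is processing node::t; the invariants (end_ unvisited,
-- key count only shrinks) are threaded through
def pvVisOk (maze : List (String × List String)) (end_ : String) (fuel : Nat) : Prop :=
  ∀ (v : PySem.Set String) (node : String) (p : List String),
    pvKeyCount maze v < fuel → PySem.Set.contains v end_ = false →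
    PySem.Set.contains (pvVisit maze end_ fuel node v p).1 end_ = false ∧
    pvKeyCount maze (pvVisit maze end_ fuel node v p).1 ≤ pvKeyCount maze v ∧
    ∀ t, pvGo maze end_ (node :: t) v p =
      (if (pvVisit maze end_ fuel node v p).2.2 then (pvVisit maze end_ fuel node v p).2.1
       else pvGo maze end_ t (pvVisit maze end_ fuel node v p).1 (pvVisit maze end_ fuel node v p).2.1)

def pvAllOk (maze : List (String × List String)) (end_ : String) (fuel : Nat) : Prop :=
  ∀ (w : List String) (v : PySem.Set String) (p : List String),
    pvKeyCount maze v < fuel → PySem.Set.contains v end_ = false →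
    PySem.Set.contains (pvVisitAll maze end_ fuel w v p).1 end_ = false ∧
    pvKeyCount maze (pvVisitAll maze end_ fuel w v p).1 ≤ pvKeyCount maze v ∧
    ∀ t, pvGo maze end_ (w ++ t) v p =
      (if (pvVisitAll maze end_ fuel w v p).2.2 then (pvVisitAll maze end_ fuel w v p).2.1
       else pvGo maze end_ t (pvVisitAll maze end_ fuel w v p).1 (pvVisitAll maze end_ fuel w v p).2.1)

theorem pvKeyCount_add_le (maze : List (String × List String)) (v : PySem.Set String)
    (n : String) : pvKeyCount maze (PySem.Set.add v n) ≤ pvKeyCount maze v := by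
  apply List.Sublist.length_le
  apply List.monotone_filter_right
  intro a ha
  simp only [Bool.not_eq_eq_eq_not, Bool.not_true] at ha ⊢
  rw [Bool.eq_false_iff] at ha ⊢
  intro h
  apply ha
  rw [PySem.Set.contains_iff] at h ⊢
  exact (PySem.Set.mem_add _ _ _).2 (Or.inl h)

theorem pvFuel_enough (maze : List (String × List String)) (end_ : String) :
    ∀ fuel : Nat, pvVisOk maze end_ fuel ∧ pvAllOk maze end_ fuel := by
  intro fuel
  induction fuel with
  | zero =>
    constructor
    · intro v node p hlt; omega
    · intro w v p hlt; omega
  | succ fuel ih =>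
    have hvis : pvVisOk maze end_ (fuel + 1) := by
      intro v node p hlt hend
      by_cases hne : (node == end_) = true
      · have heq : pvVisit maze end_ (fuel + 1) node v p = (v, p ++ [node], true) := by
          simp [pvVisit, hne]
        rw [heq]
        refine ⟨hend, le_rfl, fun t => ?_⟩
        rw [pvGo_end maze end_ node t v p hne]
        simp
      · simp only [Bool.not_eq_true] at hne
        by_cases hv : PySem.Set.contains v node = true
        · have hvm : node ∈ v := (PySem.Set.contains_iff _ _).1 hv
          have heq : pvVisit maze end_ (fuel + 1) node v p = (v, p, false) := by
            simp [pvVisit, hne, hvm]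
          rw [heq]
          refine ⟨hend, le_rfl, fun t => ?_⟩
          rw [pvGo_skip maze end_ node t v p hne hv]
          simp
        · simp only [Bool.not_eq_true] at hv
          have hvm : ¬ node ∈ v := by
            intro hmem
            rw [(PySem.Set.contains_iff _ _).2 hmem] at hv
            cases hv
          have hend' : PySem.Set.contains (PySem.Set.add v node) end_ = false := by
            rw [Bool.eq_false_iff] at hend ⊢
            intro hcc
            rw [PySem.Set.contains_iff] at hcc
            rcases (PySem.Set.mem_add _ _ _).1 hcc with hcc | hcc
            · exact hend ((PySem.Set.contains_iff _ _).2 hcc)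
            · rw [hcc] at hne; simp at hne
          cases hg : (PySem.Dict.mk maze).get? node with
          | none =>
            have heq : pvVisit maze end_ (fuel + 1) node v p
                = (PySem.Set.add v node, p ++ [node], true) := by
              simp [pvVisit, hne, hvm, hg]
            rw [heq]
            refine ⟨hend', pvKeyCount_add_le maze v node, fun t => ?_⟩
            rw [pvGo_none maze end_ node t v p hne hv hg]
            simp
          | some ns =>
            have hmem : node ∈ maze.map Prod.fst := pvGet?_mk_mem maze node ns hg
            have hklt : pvKeyCount maze (PySem.Set.add v node) < pvKeyCount maze v :=
              pvKeyCount_lt maze v node hmem hv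
            have hfuel' : pvKeyCount maze (PySem.Set.add v node) < fuel := by omega
            obtain ⟨h1, h2, h3⟩ := ih.2 ns.reverse (PySem.Set.add v node) (p ++ [node]) hfuel' hend'
            have heq : pvVisit maze end_ (fuel + 1) node v p
                = pvVisitAll maze end_ fuel ns.reverse (PySem.Set.add v node) (p ++ [node]) := by
              simp [pvVisit, hne, hvm, hg]
            rw [heq]
            refine ⟨h1, by omega, fun t => ?_⟩
            rw [pvGo_expand maze end_ node t v p ns hne hv hg]
            exact h3 t
    refine ⟨hvis, ?_⟩
    intro w
    induction w with
    | nil =>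
      intro v p hlt hend
      have heq : pvVisitAll maze end_ (fuel + 1) [] v p = (v, p, false) := by
        simp [pvVisitAll]
      rw [heq]
      exact ⟨hend, le_rfl, fun t => by simp⟩
    | cons n rest iht =>
      intro v p hlt hend
      obtain ⟨h1, h2, h3⟩ := hvis v n p hlt hend
      cases hres : pvVisit maze end_ (fuel + 1) n v p with
      | mk v1 rest1 =>
        obtain ⟨p1, f1⟩ := rest1
        rw [hres] at h1 h2 h3
        simp only at h1 h2 h3
        cases f1 with
        | true =>
          have heq : pvVisitAll maze end_ (fuel + 1) (n :: rest) v p = (v1, p1, true) := by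
            simp [pvVisitAll, hres]
          rw [heq]
          refine ⟨h1, h2, fun t => ?_⟩
          have hstep := h3 (rest ++ t)
          simp only [if_pos] at hstep
          simp only [List.cons_append]
          simpa using hstep
        | false =>
          obtain ⟨g1, g2, g3⟩ := iht v1 p1 (by omega) h1
          have heq : pvVisitAll maze end_ (fuel + 1) (n :: rest) v p
              = pvVisitAll maze end_ (fuel + 1) rest v1 p1 := by
            simp [pvVisitAll, hres]
          rw [heq]
          refine ⟨g1, by omega, fun t => ?_⟩
          have hstep := h3 (rest ++ t)
          simp only at hstep
          simp only [List.cons_append]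
          rw [if_neg (by simp)] at hstep
          rw [hstep]
          exact g3 t

theorem pvKeyCount_empty_le (maze : List (String × List String)) :
    pvKeyCount maze PySem.Set.empty ≤ maze.length := by
  calc pvKeyCount maze PySem.Set.empty
      ≤ (maze.map Prod.fst).length := List.length_filter_le _ _
    _ = maze.length := List.length_map ..

-- the two ports agree on every input
theorem pvPorts_eq (maze : List (String × List String)) (start end_ : String) :
    dfs_maze maze start end_ = dfs_maze_alt maze start end_ := by
  unfold dfs_maze dfs_maze_alt
  have hA := pvLoopA_eq_pvGo maze end_ (pvKeyCount maze PySem.Set.empty) PySem.Set.empty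
    le_rfl rfl ([] : List String) (pvDel.keep (n := start) pvDel.nil)
  simp only [List.reverse_cons, List.reverse_nil, List.nil_append] at hA
  rw [hA]
  have hfuel : pvKeyCount maze PySem.Set.empty < maze.length + 1 :=
    Nat.lt_succ_of_le (pvKeyCount_empty_le maze)
  obtain ⟨_, _, h3⟩ := (pvFuel_enough maze end_ (maze.length + 1)).1
    PySem.Set.empty start [] hfuel rfl
  have := h3 []
  rw [this]
  split
  · rfl
  · rw [pvGo_nil]

-- ===== VERDICT (by name: the statement is the Claim_ definition above) =====
theorem dfs_maze_spec : Claim_equal_dfs_maze := by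
  intro maze start end_ _ _
  unfold Spec_dfs_maze
  exact pvPorts_eq maze start end_
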